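-- pv_equiv track=rewrite | github.com/thom-heinrich/twinr | agentic_tools/findings/store.py | _reordered_mapping
-- ===== SOURCE A (Python) =====
-- from typing import Any, Dict, List, Mapping, MutableMapping, Optional, Sequence, Tuple
--
-- def _reordered_mapping(raw: Any, order: Sequence[str]) -> Dict[str, Any]:
--     if not isinstance(raw, Mapping):
--         return {}
--     src = dict(raw)
--     out: Dict[str, Any] = {}
--     for k in order:
--         if k in src:
--             out[k] = src.pop(k)
--     # Preserve any unknown keys (append at end, stable sorted for determinism).
--     for k in sorted(src.keys()):
--         out[k] = src[k]
--     return out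
-- ===== SOURCE B (Python) =====
-- from typing import Any, Dict, Mapping, Sequence
--
--
-- def _reordered_mapping(raw: Any, order: Sequence[str]) -> Dict[str, Any]:
--     if not isinstance(raw, Mapping):
--         return {}
--     src = dict(raw)
--     rank: Dict[str, int] = {}
--     for i, k in enumerate(order):
--         if k not in rank:
--             rank[k] = i
--     n = len(order)
--     out: Dict[str, Any] = {}
--     for k in sorted(src.keys(), key=lambda k: (rank.get(k, n), k)):
--         out[k] = src[k]
--     return out
-- ===== Notes on version B (the rewrite author's own statement) =====
-- stated objective: alternative
-- what changed: A pops keys of `order` out of a copy of the source and then appends the sorted leftovers in a second pass; B instead builds a first-occurrence rank index over `order` and produces the whole output with one sort of all source keys under the composite key (rank or len(order), key name).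
import Mathlib
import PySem

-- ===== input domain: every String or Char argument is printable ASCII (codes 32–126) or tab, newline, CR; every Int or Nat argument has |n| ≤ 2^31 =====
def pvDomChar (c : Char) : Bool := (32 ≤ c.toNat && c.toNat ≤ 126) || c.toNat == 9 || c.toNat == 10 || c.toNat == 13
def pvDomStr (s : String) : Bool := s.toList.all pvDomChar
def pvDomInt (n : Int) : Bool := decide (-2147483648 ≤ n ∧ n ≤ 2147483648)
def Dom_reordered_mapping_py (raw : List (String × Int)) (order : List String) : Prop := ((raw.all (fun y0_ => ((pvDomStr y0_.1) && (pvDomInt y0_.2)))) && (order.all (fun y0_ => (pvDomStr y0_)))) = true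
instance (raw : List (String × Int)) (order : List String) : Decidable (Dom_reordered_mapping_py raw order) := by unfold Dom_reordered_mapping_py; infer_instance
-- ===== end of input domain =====

-- B replaces A's two building passes (pop the keys of `order` out of the source, then append the
-- sorted leftovers) by ONE composite-key sort of all source keys (first index in `order`, or
-- len(order), then the key name); objective: alternative decomposition, same asymptotic cost.

-- ===== PORT A =====
-- literal transliteration of _reordered_mapping; the `isinstance(raw, Mapping)` guard is
-- vacuous under the type convention (`raw` is always a mapping here).
def reordered_mapping_py (raw : List (String × Int)) (order : List String) : List (String × Int) :=
  let src : PySem.Dict String Int := PySem.Dict.ofList raw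
  let st := order.foldl
    (fun (st : PySem.Dict String Int × PySem.Dict String Int) k =>
      if st.1.contains k then
        match st.1.pop? k with
        | some (v, s') => (s', st.2.insert k v)
        | none => st
      else st)
    (src, PySem.Dict.empty)
  let out := (PySem.List.sorted st.1.keys (fun k => k)).foldl
    (fun (out : PySem.Dict String Int) k => out.insert k (st.1.getD k 0)) st.2
  out.items

-- ===== PORT B =====
-- literal transliteration of Source B
def reordered_mapping_py_alt (raw : List (String × Int)) (order : List String) : List (String × Int) :=
  let src : PySem.Dict String Int := PySem.Dict.ofList raw
  let rank := (PySem.List.enumerate order).foldl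
    (fun (r : PySem.Dict String Int) p => if r.contains p.2 then r else r.insert p.2 p.1)
    PySem.Dict.empty
  let n : Int := order.length
  let out := (PySem.List.sorted2 src.keys (fun k => rank.getD k n) (fun k => k)).foldl
    (fun (out : PySem.Dict String Int) k => out.insert k (src.getD k 0)) PySem.Dict.empty
  out.items

-- ===== PRECONDITION & SPEC =====
def Spec_reordered_mapping_py (raw : List (String × Int)) (order : List String) (out : List (String × Int)) : Prop := out = reordered_mapping_py_alt raw order
instance (raw : List (String × Int)) (order : List String) (out : List (String × Int)) : Decidable (Spec_reordered_mapping_py raw order out) := by unfold Spec_reordered_mapping_py; infer_instance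

-- ===== CLAIM (what is proved, stated in full; the proofs are below) =====
def Claim_equal_reordered_mapping_py : Prop := ∀ (raw : List (String × Int)) (order : List String), Dom_reordered_mapping_py raw order → Spec_reordered_mapping_py raw order (reordered_mapping_py raw order)

-- ===== LEMMAS AND PROOFS =====

-- list-level facts about PySem.Dict.erase (items filter); the prelude has no erase lemmas
theorem find?_filter_ne {ν : Type} (l : List (String × ν)) (k k' : String) (h : k' ≠ k) :
    List.find? (fun p => p.1 == k') (l.filter (fun p => !(p.1 == k))) =
      List.find? (fun p => p.1 == k') l := by
  induction l with
  | nil => rfl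
  | cons p t ih =>
    by_cases hk : p.1 = k
    · have h2 : (p.1 == k') = false := by simp [hk, Ne.symm h]
      simp [hk, ih, Ne.symm h]
    · by_cases hk' : p.1 = k'
      · simp [hk', h]
      · simp [hk, hk', ih]

theorem get?_erase {ν : Type} (d : PySem.Dict String ν) (k k' : String) :
    (d.erase k).get? k' = if k' = k then none else d.get? k' := by
  by_cases h : k' = k
  · subst h
    simp [PySem.Dict.erase, PySem.Dict.get?, List.find?_eq_none]
  · simp [PySem.Dict.erase, PySem.Dict.get?, h, find?_filter_ne _ _ _ h]

theorem keys_erase {ν : Type} (d : PySem.Dict String ν) (k : String) :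
    (d.erase k).keys = d.keys.filter (fun x => !(x == k)) := by
  simp [PySem.Dict.erase, PySem.Dict.keys, List.filter_map]
  rfl

theorem contains_erase {ν : Type} (d : PySem.Dict String ν) (k k' : String) :
    (d.erase k).contains k' = (!(k' == k) && d.contains k') := by
  rw [PySem.Dict.contains_eq_isSome_get?, PySem.Dict.contains_eq_isSome_get?, get?_erase]
  by_cases h : k' = k <;> simp [h]

def pickA (s : PySem.Dict String Int) : List String → List String
  | [] => []
  | k :: rest => if s.contains k then k :: pickA (s.erase k) rest else pickA s rest

theorem pickA_mem (order : List String) (s : PySem.Dict String Int) (x : String) :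
    x ∈ pickA s order ↔ s.contains x = true ∧ x ∈ order := by
  induction order generalizing s with
  | nil => simp [pickA]
  | cons k rest ih =>
    by_cases hc : s.contains k = true
    · simp only [pickA, if_pos hc, List.mem_cons]
      rw [ih]
      constructor
      · rintro (rfl | ⟨h1, h2⟩)
        · exact ⟨hc, Or.inl rfl⟩
        · rw [contains_erase] at h1
          simp at h1
          exact ⟨h1.2, Or.inr h2⟩
      · rintro ⟨h1, rfl | h2⟩
        · exact Or.inl rfl
        · by_cases hx : x = k
          · exact Or.inl hx
          · exact Or.inr ⟨by rw [contains_erase]; simp [hx, h1], h2⟩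
    · simp only [pickA, if_neg hc, List.mem_cons]
      rw [ih]
      constructor
      · rintro ⟨h1, h2⟩; exact ⟨h1, Or.inr h2⟩
      · rintro ⟨h1, rfl | h2⟩
        · exact absurd h1 hc
        · exact ⟨h1, h2⟩

theorem pickA_nodup (order : List String) (s : PySem.Dict String Int) :
    (pickA s order).Nodup := by
  induction order generalizing s with
  | nil => simp [pickA]
  | cons k rest ih =>
    by_cases hc : s.contains k = true
    · simp only [pickA, if_pos hc, List.nodup_cons]
      refine ⟨fun hmem => ?_, ih _⟩
      rw [pickA_mem, contains_erase] at hmem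
      simp at hmem
    · simpa [pickA, if_neg hc] using ih s

theorem pickA_idxOf (order : List String) (s : PySem.Dict String Int) :
    (pickA s order).Pairwise (fun a b => order.idxOf a < order.idxOf b) := by
  induction order generalizing s with
  | nil => simp [pickA]
  | cons k rest ih =>
    have lift : ∀ (s' : PySem.Dict String Int), s'.contains k = false →
        (pickA s' rest).Pairwise (fun a b => (k :: rest).idxOf a < (k :: rest).idxOf b) := by
      intro s' hs'
      refine (ih s').imp_of_mem ?_
      intro a b ha hb hab
      have hka : (k == a) = false := by
        rw [pickA_mem] at ha
        simp only [beq_eq_false_iff_ne]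
        rintro rfl; rw [ha.1] at hs'; simp at hs'
      have hkb : (k == b) = false := by
        rw [pickA_mem] at hb
        simp only [beq_eq_false_iff_ne]
        rintro rfl; rw [hb.1] at hs'; simp at hs'
      simp [List.idxOf_cons, hka, hkb]
      omega
    by_cases hc : s.contains k = true
    · simp only [pickA, if_pos hc]
      have hek : (s.erase k).contains k = false := by
        rw [contains_erase]; simp
      refine List.Pairwise.cons ?_ (lift _ hek)
      intro b hb
      have hkb : (k == b) = false := by
        rw [pickA_mem] at hb
        simp only [beq_eq_false_iff_ne]
        rintro rfl; rw [hb.1] at hek; simp at hek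
      simp [List.idxOf_cons, hkb]
    · simpa [pickA, if_neg hc] using lift s (Bool.not_eq_true _ ▸ by simpa using hc)

def stepA (st : PySem.Dict String Int × PySem.Dict String Int) (k : String) :
    PySem.Dict String Int × PySem.Dict String Int :=
  if st.1.contains k then
    match st.1.pop? k with
    | some (v, s') => (s', st.2.insert k v)
    | none => st
  else st

theorem stepA_of_contains (s out : PySem.Dict String Int) (k : String)
    (hc : s.contains k = true) :
    stepA (s, out) k = (s.erase k, out.insert k (s.getD k 0)) := by
  have hv : (s.get? k).isSome := by
    rw [← PySem.Dict.contains_eq_isSome_get?]; exact hc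
  obtain ⟨v, hv⟩ := Option.isSome_iff_exists.mp hv
  simp [stepA, hc, PySem.Dict.pop?, hv, PySem.Dict.getD, Option.getD]

theorem stepA_of_not_contains (s out : PySem.Dict String Int) (k : String)
    (hc : ¬ s.contains k = true) :
    stepA (s, out) k = (s, out) := by
  simp [stepA, hc]

theorem loopA_snd (order : List String) (s out : PySem.Dict String Int) :
    (order.foldl stepA (s, out)).2 =
      (pickA s order).foldl (fun o k => o.insert k (s.getD k 0)) out := by
  induction order generalizing s out with
  | nil => rfl
  | cons k rest ih =>
    by_cases hc : s.contains k = true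
    · rw [List.foldl_cons, stepA_of_contains s out k hc, ih]
      simp only [pickA, if_pos hc, List.foldl_cons]
      apply PySem.List.foldl_congr_mem
      intro o k' hk'
      have hne : k' ≠ k := by
        rw [pickA_mem, contains_erase] at hk'
        simp at hk'
        exact fun h => absurd h hk'.1.1
      rw [PySem.Dict.getD, get?_erase, if_neg hne, ← PySem.Dict.getD]
    · rw [List.foldl_cons, stepA_of_not_contains s out k hc, ih]
      simp only [pickA, if_neg hc]

theorem loopA_fst_get? (order : List String) (s out : PySem.Dict String Int) (k' : String) :
    (order.foldl stepA (s, out)).1.get? k' =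
      if k' ∈ pickA s order then none else s.get? k' := by
  induction order generalizing s out with
  | nil => simp [pickA]
  | cons k rest ih =>
    by_cases hc : s.contains k = true
    · rw [List.foldl_cons, stepA_of_contains s out k hc, ih]
      simp only [pickA, if_pos hc, List.mem_cons]
      by_cases hk : k' = k
      · simp [hk, get?_erase]
      · simp only [hk, false_or]
        by_cases hm : k' ∈ pickA (s.erase k) rest
        · simp [hm]
        · simp [hm, get?_erase, hk]
    · rw [List.foldl_cons, stepA_of_not_contains s out k hc, ih]
      simp only [pickA, if_neg hc]

theorem loopA_fst_keys (order : List String) (s out : PySem.Dict String Int) :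
    (order.foldl stepA (s, out)).1.keys =
      s.keys.filter (fun x => !decide (x ∈ pickA s order)) := by
  induction order generalizing s out with
  | nil => simp [pickA]
  | cons k rest ih =>
    by_cases hc : s.contains k = true
    · rw [List.foldl_cons, stepA_of_contains s out k hc, ih, keys_erase,
        List.filter_filter]
      refine List.filter_congr ?_
      intro x _
      simp only [pickA, if_pos hc, List.mem_cons]
      by_cases hk : x = k <;> by_cases hm : x ∈ pickA (s.erase k) rest <;> simp [hk, hm]
    · rw [List.foldl_cons, stepA_of_not_contains s out k hc, ih]
      refine List.filter_congr ?_
      intro x _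
      simp only [pickA, if_neg hc]

def rankStep (r : PySem.Dict String Int) (p : Int × String) : PySem.Dict String Int :=
  if r.contains p.2 then r else r.insert p.2 p.1

theorem rank_getD (order : List String) (s0 : Int) (d : PySem.Dict String Int)
    (k : String) (n : Int) :
    ((PySem.List.enumerate order s0).foldl rankStep d).getD k n =
      if d.contains k then d.getD k n
      else if k ∈ order then s0 + (order.idxOf k : Int) else n := by
  induction order generalizing s0 d with
  | nil =>
    simp only [PySem.List.enumerate_nil, List.foldl_nil, List.not_mem_nil, if_false]
    by_cases hc : d.contains k = true
    · simp [hc]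
    · simp [hc, PySem.Dict.getD_of_not_contains _ _ (by simpa using hc)]
  | cons x rest ih =>
    rw [PySem.List.enumerate_cons, List.foldl_cons]
    by_cases hc : d.contains x = true
    · have hstep : rankStep d (s0, x) = d := by simp [rankStep, hc]
      rw [hstep, ih]
      by_cases hk : k = x
      · subst hk; simp [hc]
      · simp only [List.mem_cons, hk, false_or, List.idxOf_cons,
          beq_eq_false_iff_ne.mpr (Ne.symm hk)]
        by_cases hdk : d.contains k = true
        · simp [hdk]
        · by_cases hmem : k ∈ rest
          · simp [hdk, hmem, cond]
            ring
          · simp [hdk, hmem]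
    · have hstep : rankStep d (s0, x) = d.insert x s0 := by simp [rankStep, hc]
      rw [hstep, ih]
      by_cases hk : k = x
      · subst hk
        simp [PySem.Dict.contains_insert_self, PySem.Dict.getD_insert_self, hc,
          List.idxOf_cons_self]
      · rw [PySem.Dict.contains_insert, PySem.Dict.getD_insert_of_ne _ _ _ hk]
        simp only [beq_eq_false_iff_ne.mpr hk, Bool.false_or, List.mem_cons, hk, false_or,
          List.idxOf_cons, beq_eq_false_iff_ne.mpr (Ne.symm hk)]
        by_cases hdk : d.contains k = true
        · simp [hdk]
        · by_cases hmem : k ∈ rest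
          · simp [hdk, hmem, cond]
            ring
          · simp [hdk, hmem]

theorem sorted2_eq_sorted_lex (xs : List String) (k1 : String → Int) :
    PySem.List.sorted2 xs k1 (fun k => k) =
      PySem.List.sorted xs (fun k => toLex ((k1 k, k) : Int × String)) := by
  have hbf : (fun a b : String => decide (k1 a < k1 b) || (!decide (k1 b < k1 a) && decide (a < b)))
      = (fun a b : String =>
          decide (toLex ((k1 a, a) : Int × String) < toLex ((k1 b, b) : Int × String))) := by
    funext a b
    simp only [Prod.Lex.toLex_lt_toLex]
    rcases lt_trichotomy (k1 a) (k1 b) with h | h | h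
    · simp [h]
    · simp [h]
    · have h1 : decide (k1 b < k1 a) = true := by simp [h]
      have h2 : decide (k1 a = k1 b) = false := by simp [(ne_of_gt h)]
      simp [not_lt_of_gt h, h1, h2]
  rw [PySem.List.sorted_eq_foldl_insertBy]
  show xs.foldl (fun acc x => PySem.List.insertBy
      (fun a b : String => decide (k1 a < k1 b) || (!decide (k1 b < k1 a) && decide (a < b)))
      x acc) [] = _
  rw [hbf]

-- the two ports agree everywhere: A's key sequence (popped-in-order keys, then the sorted
-- leftovers) is exactly the strictly increasing rearrangement under B's composite key
theorem main_eq (raw : List (String × Int)) (order : List String) :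
    reordered_mapping_py raw order = reordered_mapping_py_alt raw order := by
  -- abbreviations
  set src : PySem.Dict String Int := PySem.Dict.ofList raw with hsrc
  have hK : src.keys.Nodup := PySem.Dict.nodup_keys_ofList raw
  set pick : List String := pickA src order with hpick
  set st := order.foldl stepA (src, PySem.Dict.empty) with hst
  set rest : List String := PySem.List.sorted st.1.keys (fun k => k) with hrest
  set rank := (PySem.List.enumerate order).foldl rankStep PySem.Dict.empty with hrank
  set n : Int := (order.length : Int) with hn
  -- both ports, lets and lambdas resolved (definitional)
  have hA : reordered_mapping_py raw order =
      (rest.foldl (fun o k => o.insert k (st.1.getD k 0)) st.2).items := rfl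
  have hB : reordered_mapping_py_alt raw order =
      ((PySem.List.sorted2 src.keys (fun k => rank.getD k n) (fun k => k)).foldl
        (fun o k => o.insert k (src.getD k 0)) PySem.Dict.empty).items := rfl
  -- key facts
  have hpick_mem : ∀ x, x ∈ pick ↔ src.contains x = true ∧ x ∈ order := fun x => pickA_mem order src x
  have hpick_nd : pick.Nodup := pickA_nodup order src
  have hkeys1 : st.1.keys = src.keys.filter (fun x => !decide (x ∈ pick)) :=
    loopA_fst_keys order src PySem.Dict.empty
  have hkeys1_nd : st.1.keys.Nodup := by rw [hkeys1]; exact hK.filter _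
  have hrest_perm : rest.Perm st.1.keys := PySem.List.sorted_perm _ _ _
  have hrest_nd : rest.Nodup := hrest_perm.nodup_iff.mpr hkeys1_nd
  have hrest_mem : ∀ x, x ∈ rest ↔ x ∈ src.keys ∧ x ∉ pick := by
    intro x
    rw [hrest_perm.mem_iff, hkeys1, List.mem_filter]
    simp
  -- rank values
  have hrank_pick : ∀ k ∈ pick, rank.getD k n = (order.idxOf k : Int) := by
    intro k hk
    rw [hrank, rank_getD]
    simp [((hpick_mem k).mp hk).2, PySem.Dict.contains_empty]
  have hrank_rest : ∀ k ∈ rest, rank.getD k n = n := by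
    intro k hk
    have hko : k ∉ order := by
      intro ho
      have : k ∈ pick := (hpick_mem k).mpr
        ⟨(PySem.Dict.contains_iff_mem_keys _ _).mpr ((hrest_mem k).mp hk).1, ho⟩
      exact ((hrest_mem k).mp hk).2 this
    rw [hrank, rank_getD]
    simp [hko, PySem.Dict.contains_empty]
  -- the composite-key sort names A's key sequence
  have hks : PySem.List.sorted2 src.keys (fun k => rank.getD k n) (fun k => k) = pick ++ rest := by
    rw [sorted2_eq_sorted_lex]
    apply PySem.List.sorted_eq_of_perm_of_pairwise_lt
    · -- permutation
      have h1 : pick.Perm (src.keys.filter (fun x => decide (x ∈ pick))) := by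
        rw [List.perm_ext_iff_of_nodup hpick_nd (hK.filter _)]
        intro a
        rw [List.mem_filter]
        constructor
        · intro ha
          exact ⟨(PySem.Dict.contains_iff_mem_keys _ _).mp ((hpick_mem a).mp ha).1, by simpa using ha⟩
        · rintro ⟨-, ha⟩; simpa using ha
      have h2 : rest.Perm (src.keys.filter (fun x => !decide (x ∈ pick))) := by
        rw [← hkeys1]; exact hrest_perm
      exact (h1.append h2).trans (List.filter_append_perm _ _)
    · -- strictly increasing under the lexicographic key
      rw [List.pairwise_append]
      refine ⟨?_, ?_, ?_⟩
      · refine (pickA_idxOf order src).imp_of_mem ?_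
        intro a b ha hb hab
        rw [Prod.Lex.toLex_lt_toLex]
        left
        rw [hrank_pick a ha, hrank_pick b hb]
        dsimp only
        exact_mod_cast hab
      · have h1 : rest.Pairwise (fun a b : String => a ≤ b) :=
          PySem.List.sorted_pairwise st.1.keys (fun k => k)
        have h2 : rest.Pairwise (fun a b : String => a ≠ b) := hrest_nd
        refine ((h1.and h2).imp_of_mem ?_)
        intro a b ha hb hab
        rw [Prod.Lex.toLex_lt_toLex]
        right
        rw [hrank_rest a ha, hrank_rest b hb]
        exact ⟨rfl, lt_of_le_of_ne hab.1 hab.2⟩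
      · intro a ha b hb
        rw [Prod.Lex.toLex_lt_toLex]
        left
        rw [hrank_pick a ha, hrank_rest b hb, hn]
        dsimp only
        exact_mod_cast List.idxOf_lt_length_of_mem ((hpick_mem a).mp ha).2
  -- A's first loop output dict
  have hst2 : st.2 = pick.foldl (fun o k => o.insert k (src.getD k 0)) PySem.Dict.empty := by
    rw [hst, loopA_snd, hpick]
  have hst2_items : st.2.items = pick.map (fun k => (k, src.getD k 0)) := by
    rw [hst2]
    have := PySem.Dict.items_foldl_insert_fresh pick (fun a => a) (fun a => src.getD a 0)
      PySem.Dict.empty (fun a _ => PySem.Dict.contains_empty a) (by simpa using hpick_nd)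
    simpa using this
  have hst2_keys : st.2.keys = PySem.Set.ofList pick := by
    rw [hst2]
    have := PySem.Dict.keys_foldl_insert pick (fun d a => src.getD a 0) PySem.Dict.empty
    simpa [PySem.Dict.keys_empty] using this
  -- A's second loop appends the sorted leftovers
  have hA_items : reordered_mapping_py raw order =
      pick.map (fun k => (k, src.getD k 0)) ++ rest.map (fun k => (k, st.1.getD k 0)) := by
    rw [hA]
    have hfresh : ∀ a ∈ rest, st.2.contains a = false := by
      intro a ha
      rw [PySem.Dict.contains_eq_decide_mem_keys, hst2_keys]
      simp only [decide_eq_false_iff_not, PySem.Set.mem_ofList]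
      exact ((hrest_mem a).mp ha).2
    have := PySem.Dict.items_foldl_insert_fresh rest (fun a => a) (fun a => st.1.getD a 0)
      st.2 hfresh (by simpa using hrest_nd)
    simpa [hst2_items] using this
  -- leftover values are the source values
  have hvals : ∀ k ∈ rest, st.1.getD k 0 = src.getD k 0 := by
    intro k hk
    rw [PySem.Dict.getD, PySem.Dict.getD, hst, loopA_fst_get?,
      if_neg (by rw [← hpick]; exact ((hrest_mem k).mp hk).2)]
  -- B's single loop
  have hB_items : reordered_mapping_py_alt raw order =
      (pick ++ rest).map (fun k => (k, src.getD k 0)) := by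
    rw [hB, hks]
    have hnd : (pick ++ rest).Nodup := by
      refine List.Nodup.append hpick_nd hrest_nd ?_
      intro a ha hb
      exact ((hrest_mem a).mp hb).2 ha
    have := PySem.Dict.items_foldl_insert_fresh (pick ++ rest) (fun a => a)
      (fun a => src.getD a 0) PySem.Dict.empty
      (fun a _ => PySem.Dict.contains_empty a) (by simpa using hnd)
    simpa using this
  rw [hA_items, hB_items, List.map_append]
  congr 1
  exact List.map_congr_left (fun a ha => by rw [hvals a ha])

-- ===== VERDICT (by name: the statement is the Claim_ definition above) =====
theorem reordered_mapping_py_spec : Claim_equal_reordered_mapping_py := by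
  intro raw order _
  unfold Spec_reordered_mapping_py
  exact main_eq raw order
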